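-- pv_equiv track=rewrite | github.com/Vestaboard/vbml | python/pyvbml/render_component.py | render_component
-- ===== SOURCE A (Python) =====
-- def render_component(
--     empty_component: list[list[int]],
--     codes: list[list[int]],
-- ) -> list[list[int]]:
--     """Render component."""
--     return [
--         [
--             codes[row_idx][col_idx]
--             if row_idx < len(codes) and col_idx < len(codes[row_idx])
--             else char
--             for col_idx, char in enumerate(line)
--         ]
--         for row_idx, line in enumerate(empty_component)
--     ]
-- ===== SOURCE B (Python) =====
-- def render_component(
--     empty_component: list[list[int]],
--     codes: list[list[int]],
-- ) -> list[list[int]]: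
--     """Render component."""
--     result = []
--     it = iter(codes)
--     for line in empty_component:
--         crow = next(it, None)
--         if crow is None:
--             result.append(list(line))
--         else:
--             result.append(crow[:len(line)] + line[len(crow):])
--     return result
-- ===== Notes on version B (the rewrite author's own statement) =====
-- stated objective: alternative
-- what changed: Replaces A's per-cell index-guarded nested comprehension with a simultaneous walk over both lists building each row by slice concatenation crow[:len(line)] + line[len(crow):], with no index arithmetic or bound checks.
import Mathlib
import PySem

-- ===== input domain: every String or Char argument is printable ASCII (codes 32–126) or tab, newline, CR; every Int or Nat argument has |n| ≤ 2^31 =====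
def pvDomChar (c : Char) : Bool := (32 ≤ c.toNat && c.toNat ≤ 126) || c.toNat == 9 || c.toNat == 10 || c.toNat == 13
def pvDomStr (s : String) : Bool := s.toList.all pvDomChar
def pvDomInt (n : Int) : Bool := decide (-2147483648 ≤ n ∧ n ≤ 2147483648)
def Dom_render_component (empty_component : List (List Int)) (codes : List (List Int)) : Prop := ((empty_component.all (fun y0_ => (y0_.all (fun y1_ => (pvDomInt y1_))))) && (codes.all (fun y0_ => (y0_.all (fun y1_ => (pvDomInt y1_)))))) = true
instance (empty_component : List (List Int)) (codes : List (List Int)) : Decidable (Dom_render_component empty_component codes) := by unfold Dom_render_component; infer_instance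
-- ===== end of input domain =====

-- B builds each output row by slice concatenation while walking both lists together, instead of A's
-- per-cell index-guarded comprehension; same cost, no index arithmetic (objective: alternative).

-- ===== PORT A =====
def render_component (empty_component : List (List Int)) (codes : List (List Int)) : List (List Int) :=
  (PySem.List.enumerate empty_component 0).map (fun p =>
    (PySem.List.enumerate p.2 0).map (fun q =>
      if p.1 < (codes.length : Int) ∧ q.1 < ((PySem.List.pyGetD codes p.1 ([] : List Int)).length : Int)
      then PySem.List.pyGetD (PySem.List.pyGetD codes p.1 ([] : List Int)) q.1 0
      else q.2))

-- ===== PORT B =====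
def render_component_alt (empty_component : List (List Int)) (codes : List (List Int)) : List (List Int) :=
  match empty_component, codes with
  | [], _ => []
  | line :: rest, [] => line :: render_component_alt rest []
  | line :: rest, crow :: crest =>
      (PySem.List.slice crow none (some (line.length : Int)) ++
        PySem.List.slice line (some (crow.length : Int)) none) :: render_component_alt rest crest

-- ===== PRECONDITION & SPEC =====
def Spec_render_component (empty_component : List (List Int)) (codes : List (List Int)) (out : List (List Int)) : Prop := out = render_component_alt empty_component codes
instance (empty_component : List (List Int)) (codes : List (List Int)) (out : List (List Int)) : Decidable (Spec_render_component empty_component codes out) := by unfold Spec_render_component; infer_instance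

-- ===== CLAIM (what is proved, stated in full; the proofs are below) =====
def Claim_equal_render_component : Prop := ∀ (empty_component : List (List Int)) (codes : List (List Int)), Dom_render_component empty_component codes → Spec_render_component empty_component codes (render_component empty_component codes)

-- ===== LEMMAS AND PROOFS =====

/-- A's inner comprehension over one line, started at index `s`, is the slice concatenation. -/
lemma pv_inner (crow : List Int) : ∀ (line : List Int) (s : Nat),
    (PySem.List.enumerate line (s : Int)).map
      (fun q => if q.1 < (crow.length : Int) then PySem.List.pyGetD crow q.1 0 else q.2)
    = (crow.drop s).take line.length ++ line.drop (crow.length - s) := by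
  intro line
  induction line with
  | nil => intro s; simp
  | cons ch lt ih =>
    intro s
    rw [PySem.List.enumerate_cons]
    have hcast : ((s : Int) + 1) = ((s + 1 : Nat) : Int) := by push_cast; ring
    by_cases h : s < crow.length
    · have h1 : ((s : Int)) < (crow.length : Int) := by exact_mod_cast h
      have h2 : crow.length - s = (crow.length - (s + 1)) + 1 := by omega
      simp only [List.map_cons, if_pos h1, hcast, ih (s + 1), List.length_cons,
        PySem.List.pyGetD_natCast, List.getD_eq_getElem?_getD, List.getElem?_eq_getElem h,
        Option.getD_some]
      rw [List.drop_eq_getElem_cons h, List.take_succ_cons, List.cons_append, h2,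
        List.drop_succ_cons]
    · have h1 : ¬ ((s : Int) < (crow.length : Int)) := by exact_mod_cast h
      simp only [List.map_cons, if_neg h1, hcast, ih (s + 1)]
      have h2 : crow.drop s = [] := List.drop_of_length_le (by omega)
      have h3 : crow.drop (s + 1) = [] := List.drop_of_length_le (by omega)
      have h4 : crow.length - s = 0 := by omega
      have h5 : crow.length - (s + 1) = 0 := by omega
      simp [h2, h3, h4, h5]

/-- A's outer comprehension, started at row index `s`, matches B on `codes.drop s`. -/
lemma pv_outer (codes : List (List Int)) : ∀ (e : List (List Int)) (s : Nat),
    (PySem.List.enumerate e (s : Int)).map (fun p =>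
      (PySem.List.enumerate p.2 0).map (fun q =>
        if p.1 < (codes.length : Int) ∧ q.1 < ((PySem.List.pyGetD codes p.1 ([] : List Int)).length : Int)
        then PySem.List.pyGetD (PySem.List.pyGetD codes p.1 ([] : List Int)) q.1 0
        else q.2))
    = render_component_alt e (codes.drop s) := by
  intro e
  induction e with
  | nil => intro s; simp [render_component_alt]
  | cons line rest ih =>
    intro s
    rw [PySem.List.enumerate_cons]
    have hcast : ((s : Int) + 1) = ((s + 1 : Nat) : Int) := by push_cast; ring
    by_cases h : s < codes.length
    · have h1 : ((s : Int)) < (codes.length : Int) := by exact_mod_cast h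
      have hget : PySem.List.pyGetD codes (s : Int) ([] : List Int) = codes[s] := by
        simp [PySem.List.pyGetD_natCast, List.getD_eq_getElem?_getD, List.getElem?_eq_getElem h]
      rw [List.drop_eq_getElem_cons h]
      simp only [List.map_cons, hcast, ih (s + 1)]
      rw [render_component_alt]
      congr 1
      simp only [hget, h1, true_and]
      have hi := pv_inner codes[s] line 0
      simp only [Nat.cast_zero, List.drop_zero, Nat.sub_zero] at hi
      rw [hi]
      simp [PySem.List.slice_to_natCast, PySem.List.slice_from_natCast]
    · have h1 : ¬ ((s : Int) < (codes.length : Int)) := by exact_mod_cast h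
      have h2 : codes.drop s = [] := List.drop_of_length_le (by omega)
      have h3 : codes.drop (s + 1) = [] := List.drop_of_length_le (by omega)
      simp only [List.map_cons, hcast, ih (s + 1), h2, h3]
      rw [render_component_alt]
      congr 1
      simp only [h1, false_and, if_false]
      exact PySem.List.map_snd_enumerate line 0

-- ===== VERDICT (by name: the statement is the Claim_ definition above) =====
theorem render_component_spec : Claim_equal_render_component := by
  intro e codes _
  unfold Spec_render_component render_component
  have := pv_outer codes e 0
  simpa using this
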